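-- pv_equiv track=rewrite | github.com/rehauzhang/threshold-hbs | threshold_hbs.py | compute_log_w
-- ===== SOURCE A (Python) =====
-- def compute_log_w(w):
--     value = w
--     power = 0
--
--     while value > 1:
--         if value % 2 != 0:
--             return None
--         value = value // 2
--         power += 1
--
--     return power
-- ===== SOURCE B (Python) =====
-- def compute_log_w(w):
--     if w <= 1:
--         return 0
--     if w & (w - 1) != 0:
--         return None
--     return w.bit_length() - 1
-- ===== Notes on version B (the rewrite author's own statement) =====
-- stated objective: idiomatic
-- what changed: Replaced the halving loop with the standard closed-form bitwise power-of-two test (clearing the lowest set bit) plus bit_length to read off the exponent; no loop or running counter.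
import Mathlib
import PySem

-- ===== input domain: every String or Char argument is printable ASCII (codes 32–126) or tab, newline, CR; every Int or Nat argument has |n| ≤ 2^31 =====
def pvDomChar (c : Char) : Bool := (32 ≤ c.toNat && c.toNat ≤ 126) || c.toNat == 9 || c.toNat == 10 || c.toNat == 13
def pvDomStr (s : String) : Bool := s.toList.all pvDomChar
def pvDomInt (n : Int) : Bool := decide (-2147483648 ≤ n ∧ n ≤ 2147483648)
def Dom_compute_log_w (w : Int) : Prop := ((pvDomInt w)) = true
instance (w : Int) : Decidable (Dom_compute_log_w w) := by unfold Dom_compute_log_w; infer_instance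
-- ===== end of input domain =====

-- B replaces A's halving loop with the closed-form bitwise power-of-two test; return values proved equal for all Int inputs.

-- ===== PORT A =====
-- the while loop of A, state (value, power)
def compute_log_w_go (value power : Int) : Option Int :=
  if _h : value > 1 then
    if PySem.Int.mod value 2 ≠ 0 then none
    else compute_log_w_go (PySem.Int.floordiv value 2) (power + 1)
  else some power
termination_by value.toNat
decreasing_by
  rw [PySem.Int.floordiv_eq_ediv_of_pos (by omega)]
  omega

def compute_log_w (w : Int) : Option Int := compute_log_w_go w 0

-- ===== PORT B =====
-- w.bit_length() - 1 for w ≥ 1 is exactly Nat.log2 of w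
def compute_log_w_alt (w : Int) : Option Int :=
  if w ≤ 1 then some 0
  else if Int.land w (w - 1) ≠ 0 then none
  else some (Nat.log2 w.toNat)

-- ===== PRECONDITION & SPEC =====
def Spec_compute_log_w (w : Int) (out : Option Int) : Prop := out = compute_log_w_alt w
instance (w : Int) (out : Option Int) : Decidable (Spec_compute_log_w w out) := by unfold Spec_compute_log_w; infer_instance

-- ===== CLAIM (what is proved, stated in full; the proofs are below) =====
def Claim_equal_compute_log_w : Prop := ∀ (w : Int), Dom_compute_log_w w → Spec_compute_log_w w (compute_log_w w)

-- ===== LEMMAS AND PROOFS =====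

theorem land_odd (k : Nat) : Nat.land (2 * k + 1) (2 * k) = 2 * k := by
  show (2 * k + 1) &&& (2 * k) = 2 * k
  apply Nat.eq_of_testBit_eq
  intro i
  rw [Nat.testBit_land]
  cases i with
  | zero => simp [Nat.testBit_zero, Nat.mul_mod_right]
  | succ i =>
      rw [Nat.testBit_succ, Nat.testBit_succ,
          show (2*k+1)/2 = k by omega, show (2*k)/2 = k by omega]
      simp

theorem land_even (m : Nat) (hm : 1 ≤ m) :
    Nat.land (2 * m) (2 * m - 1) = 2 * Nat.land m (m - 1) := by
  show (2 * m) &&& (2 * m - 1) = 2 * (m &&& (m - 1))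
  apply Nat.eq_of_testBit_eq
  intro i
  cases i with
  | zero =>
      rw [Nat.testBit_land]
      simp [Nat.testBit_zero, Nat.mul_mod_right]
  | succ i =>
      rw [Nat.testBit_land, Nat.testBit_succ, Nat.testBit_succ,
          show (2*m)/2 = m by omega, show (2*m-1)/2 = m - 1 by omega,
          Nat.testBit_succ, show (2*(m &&& (m-1)))/2 = m &&& (m-1) by omega, Nat.testBit_land]

theorem log2_double (m : Nat) (hm : 1 ≤ m) : Nat.log2 (2 * m) = Nat.log2 m + 1 := by
  rw [Nat.log2_eq_log_two, Nat.log2_eq_log_two, show 2 * m = m * 2 by ring,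
      Nat.log_mul_base (by norm_num) (by omega)]

-- core: the loop on a natural-number value equals the bit test
theorem go_eq (n : Nat) : ∀ (p : Int),
    compute_log_w_go (n : Int) p =
      if (n : Int) ≤ 1 then some p
      else if Nat.land n (n - 1) ≠ 0 then none
      else some (p + Nat.log2 n) := by
  induction n using Nat.strong_induction_on with
  | _ n ih =>
    intro p
    by_cases h1 : (n : Int) ≤ 1
    · rw [compute_log_w_go, dif_neg (by omega : ¬ (n : Int) > 1), if_pos h1]
    · have hn : 2 ≤ n := by omega
      rw [compute_log_w_go, dif_pos (by omega)]
      rw [PySem.Int.mod_eq_emod_of_pos (by omega), PySem.Int.floordiv_eq_ediv_of_pos (by omega)]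
      rcases Nat.even_or_odd n with ⟨m, hm⟩ | ⟨m, hm⟩
      · -- even: n = 2m, loop recurses on m
        have hm1 : 1 ≤ m := by omega
        have hmod : (n : Int) % 2 = 0 := by omega
        have hdiv : (n : Int) / 2 = (m : Int) := by omega
        rw [if_neg (by simp [hmod]), hdiv, ih m (by omega) (p + 1)]
        have hland : Nat.land n (n - 1) = 2 * Nat.land m (m - 1) := by
          rw [show n = 2 * m by omega]; exact land_even m hm1
        by_cases h2 : (m : Int) ≤ 1
        · have hm1' : m = 1 := by omega
          have hn2 : n = 2 := by omega
          subst hn2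
          simp [hm1', show Nat.land 2 1 = 0 from by decide,
                show Nat.log2 2 = 1 from by decide]
        · rw [if_neg h2, if_neg (by omega : ¬ (n : Int) ≤ 1)]
          rw [hland]
          by_cases h3 : Nat.land m (m - 1) = 0
          · rw [if_neg (by omega), if_neg (by omega)]
            rw [show Nat.log2 n = Nat.log2 m + 1 by
              rw [show n = 2 * m by omega]; exact log2_double m hm1]
            congr 1; push_cast; ring
          · rw [if_pos (by omega), if_pos (by omega)]
      · -- odd: n = 2m+1, loop returns none; land = n - 1 ≠ 0
        have hmod : (n : Int) % 2 = 1 := by omega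
        rw [if_pos (by simp [hmod])]
        have hland : Nat.land n (n - 1) = n - 1 := by
          rw [show n = 2 * m + 1 by omega, show 2 * m + 1 - 1 = 2 * m by omega]
          exact land_odd m
        rw [if_neg (by omega : ¬ (n : Int) ≤ 1), if_pos (by omega)]

theorem int_land_cast (n : Nat) (h : 1 ≤ n) :
    Int.land (n : Int) ((n : Int) - 1) = (Nat.land n (n - 1) : Int) := by
  rw [show ((n : Int) - 1) = ((n - 1 : Nat) : Int) by omega]
  rfl

-- ===== VERDICT (by name: the statement is the Claim_ definition above) =====
theorem compute_log_w_spec : Claim_equal_compute_log_w := by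
  intro w _
  unfold Spec_compute_log_w compute_log_w compute_log_w_alt
  by_cases h1 : w ≤ 1
  · rw [compute_log_w_go, dif_neg (by omega), if_pos h1]
  · have hw0 : 0 ≤ w := by omega
    obtain ⟨n, rfl⟩ := Int.eq_ofNat_of_zero_le hw0
    have hn : 2 ≤ n := by omega
    rw [go_eq n 0, if_neg h1, if_neg h1, int_land_cast n (by omega)]
    by_cases h3 : Nat.land n (n - 1) = 0
    · simp [h3]
    · rw [if_pos (by exact_mod_cast h3), if_pos (by omega)]
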